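-- pv_equiv track=rewrite | github.com/YoonDosik/Codingtest_practice | programmars/level_2/카펫.py | solution
-- ===== SOURCE A (Python) =====
-- def solution(brown, yellow):
--     n = brown + yellow
--     result = []
--     num = []
--     for i in range(1, n + 1):
--         if n % i == 0:
--             result.append([i, int(n / i)])
--             if i < int(n / i):
--                 num.append(i)
--     return result[(len(num))]
-- ===== SOURCE B (Python) =====
-- def solution(brown, yellow):
--     n = brown + yellow
--     d = 1
--     while d * d < n:
--         d += 1
--     while n % d != 0:
--         d += 1
--     return [d, n // d]
-- ===== Notes on version B (the rewrite author's own statement) =====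
-- stated objective: faster
-- what changed: A enumerates all i in 1..n collecting every divisor pair and then indexes into that list; B scans upward from the integer square root for the smallest divisor d with d*d >= n and returns [d, n//d] directly.
import Mathlib
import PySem

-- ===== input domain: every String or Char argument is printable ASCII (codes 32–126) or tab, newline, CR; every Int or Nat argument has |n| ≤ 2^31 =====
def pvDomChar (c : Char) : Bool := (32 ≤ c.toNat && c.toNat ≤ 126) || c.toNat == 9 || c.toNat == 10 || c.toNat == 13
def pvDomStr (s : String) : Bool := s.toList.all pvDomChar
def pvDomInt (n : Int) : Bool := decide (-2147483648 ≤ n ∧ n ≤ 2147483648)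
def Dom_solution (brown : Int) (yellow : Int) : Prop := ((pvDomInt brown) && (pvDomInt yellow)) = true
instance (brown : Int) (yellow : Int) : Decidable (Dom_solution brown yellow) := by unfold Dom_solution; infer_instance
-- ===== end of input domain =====

-- B replaces A's full 1..n divisor enumeration by an upward scan from the integer
-- square root for the smallest divisor d with n ≤ d*d (objective: faster).


-- ===== PORT A =====
-- `int(n / i)` (float true division, then int) is ported as PySem.Int.truncdiv,
-- which is exact for |n| < 2^53, i.e. everywhere on Dom_solution.
def solution (brown : Int) (yellow : Int) : List Int :=
  let n := brown + yellow
  let st := (PySem.List.pyRange 1 (n + 1) 1).foldl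
    (fun (st : List (List Int) × List Int) i =>
      if PySem.Int.mod n i = 0 then
        (st.1 ++ [[i, PySem.Int.truncdiv n i]],
         if i < PySem.Int.truncdiv n i then st.2 ++ [i] else st.2)
      else st) ([], [])
  -- result[len(num)] : IndexError when out of range; excluded by Pre_solution
  PySem.List.pyGetD st.1 (st.2.length : Int) []

-- ===== PORT B =====
-- while d * d < n: d += 1   (fuel only makes the recursion structural; with the
-- fuel solution_alt passes, the 0-fuel branch is never taken — see sqLoop_spec)
def sqLoop (fuel : Nat) (n : Int) (d : Int) : Int :=
  match fuel with
  | 0 => d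
  | fuel + 1 => if d * d < n then sqLoop fuel n (d + 1) else d

-- while n % d != 0: d += 1   (same fuel discipline — see divLoop_spec)
def divLoop (fuel : Nat) (n : Int) (d : Int) : Int :=
  match fuel with
  | 0 => d
  | fuel + 1 => if PySem.Int.mod n d ≠ 0 then divLoop fuel n (d + 1) else d

def solution_alt (brown : Int) (yellow : Int) : List Int :=
  let n := brown + yellow
  let d := divLoop (n.toNat + 1) n (sqLoop (n.toNat + 1) n 1)
  [d, PySem.Int.floordiv n d]

-- ===== PRECONDITION & SPEC =====
-- Pre_ excludes exactly brown + yellow ≤ 0, where A's `result` list is empty and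
-- `result[len(num)]` raises IndexError (B returns [1, brown + yellow] there).
def Pre_solution (brown : Int) (yellow : Int) : Prop := 1 ≤ brown + yellow
instance (brown : Int) (yellow : Int) : Decidable (Pre_solution brown yellow) := by
  unfold Pre_solution; infer_instance

def pvWitness_solution : Int × Int := (10, 2)

def Spec_solution (brown : Int) (yellow : Int) (out : List Int) : Prop := out = solution_alt brown yellow
instance (brown : Int) (yellow : Int) (out : List Int) : Decidable (Spec_solution brown yellow out) := by unfold Spec_solution; infer_instance

-- ===== CLAIM (what is proved, stated in full; the proofs are below) =====
def Claim_equal_solution : Prop := ∀ (brown : Int) (yellow : Int), Dom_solution brown yellow → Pre_solution brown yellow → Spec_solution brown yellow (solution brown yellow)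

-- ===== LEMMAS AND PROOFS =====

-- the divisors of n in 1..n, in increasing order, and A's two predicates
def divList (n : Int) : List Int :=
  (PySem.List.pyRange 1 (n + 1) 1).filter (fun i => decide (PySem.Int.mod n i = 0))

def pSmall (n : Int) (i : Int) : Bool := decide (i < PySem.Int.truncdiv n i)

-- A's loop, characterised: result = pairs over the divisors, num = the pSmall divisors
lemma foldA (n : Int) (L : List Int) (r : List (List Int)) (m : List Int) :
    L.foldl (fun (st : List (List Int) × List Int) i =>
      if PySem.Int.mod n i = 0 then
        (st.1 ++ [[i, PySem.Int.truncdiv n i]],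
         if i < PySem.Int.truncdiv n i then st.2 ++ [i] else st.2)
      else st) (r, m)
    = (r ++ (L.filter (fun i => decide (PySem.Int.mod n i = 0))).map
          (fun i => [i, PySem.Int.truncdiv n i]),
       m ++ (L.filter (fun i => decide (PySem.Int.mod n i = 0))).filter (pSmall n)) := by
  induction L generalizing r m with
  | nil => simp
  | cons a t ih =>
    by_cases hq : PySem.Int.mod n a = 0
    · by_cases hp : a < PySem.Int.truncdiv n a
      · simp [hq, hp, ih, pSmall]
      · simp [hq, hp, ih, pSmall]
    · simp [hq, ih]

-- a downward-closed predicate filters to a prefix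
lemma filter_eq_takeWhile_of_down (p : Int → Bool) (l : List Int)
    (h : l.Pairwise (fun a b => p b = true → p a = true)) :
    l.filter p = l.takeWhile p := by
  induction l with
  | nil => rfl
  | cons a t ih =>
    rcases List.pairwise_cons.1 h with ⟨ha, ht⟩
    by_cases hp : p a = true
    · simp [hp, ih ht]
    · have : ∀ b ∈ t, ¬ p b = true := fun b hb hpb => hp (ha b hb hpb)
      simp [hp, List.filter_eq_nil_iff.2 this]

lemma mem_divList (n i : Int) : i ∈ divList n ↔ (1 ≤ i ∧ i ≤ n ∧ i ∣ n) := by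
  simp [divList, List.mem_filter, PySem.List.mem_pyRange_one,
    PySem.Int.mod_eq_zero_iff_dvd]
  tauto

lemma truncdiv_of_dvd (n i k : Int) (hi : 1 ≤ i) (hk : n = i * k) :
    PySem.Int.truncdiv n i = k := by
  simp [PySem.Int.truncdiv, hk]
  exact Int.mul_tdiv_cancel_left k (by omega)

lemma floordiv_of_dvd (n i k : Int) (hi : 1 ≤ i) (hk : n = i * k) :
    PySem.Int.floordiv n i = k := by
  rw [PySem.Int.floordiv_eq_ediv_of_pos (by omega), hk]
  exact Int.mul_ediv_cancel_left k (by omega)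

lemma pSmall_iff (n i : Int) (_hn : 1 ≤ n) (hi : 1 ≤ i) (hd : i ∣ n) :
    pSmall n i = true ↔ i * i < n := by
  obtain ⟨k, hk⟩ := hd
  rw [pSmall, decide_eq_true_iff, truncdiv_of_dvd n i k hi hk, hk]
  constructor
  · intro h; nlinarith
  · intro h; nlinarith

-- with fuel ≥ n - a the fuel never runs out; the result is the least e ≥ a with n ≤ e*e
lemma sqLoop_spec (n : Int) (fuel : Nat) (a : Int) (hf : n ≤ a + fuel) :
    a ≤ sqLoop fuel n a ∧ n ≤ sqLoop fuel n a * sqLoop fuel n a ∧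
      ∀ e, a ≤ e → e < sqLoop fuel n a → e * e < n := by
  induction fuel generalizing a with
  | zero =>
    simp only [sqLoop]
    push_cast at hf
    refine ⟨le_refl _, ?_, by omega⟩
    by_cases h0 : a ≤ 0
    · nlinarith
    · nlinarith
  | succ fuel ih =>
    rw [sqLoop]
    by_cases hc : a * a < n
    · rw [if_pos hc]
      have hin : a < n := by nlinarith [sq_nonneg a]
      have H := ih (a + 1) (by push_cast at hf ⊢; omega)
      refine ⟨by omega, H.2.1, ?_⟩
      intro e he1 he2
      rcases eq_or_lt_of_le he1 with rfl | h'
      · exact hc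
      · exact H.2.2 e (by omega) he2
    · rw [if_neg hc]
      exact ⟨le_refl _, by omega, by omega⟩

-- the result is the least divisor-candidate e ≥ a of n (it is n itself at the latest)
lemma divLoop_spec (n : Int) (fuel : Nat) (a : Int) (ha : a ≤ n) (hf : n ≤ a + fuel) :
    a ≤ divLoop fuel n a ∧ divLoop fuel n a ≤ n ∧
      PySem.Int.mod n (divLoop fuel n a) = 0 ∧
      ∀ e, a ≤ e → e < divLoop fuel n a → PySem.Int.mod n e ≠ 0 := by
  induction fuel generalizing a with
  | zero =>
    simp only [divLoop]
    have han : a = n := by push_cast at hf; omega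
    refine ⟨le_refl _, ha, ?_, by omega⟩
    rw [han]
    exact (PySem.Int.mod_eq_zero_iff_dvd _ _).2 dvd_rfl
  | succ fuel ih =>
    rw [divLoop]
    by_cases hc : PySem.Int.mod n a ≠ 0
    · rw [if_pos hc]
      have han : a ≠ n := fun h =>
        hc (h ▸ (PySem.Int.mod_eq_zero_iff_dvd _ _).2 dvd_rfl)
      have H := ih (a + 1) (by omega) (by push_cast at hf ⊢; omega)
      refine ⟨by omega, H.2.1, H.2.2.1, ?_⟩
      intro e he1 he2
      rcases eq_or_lt_of_le he1 with rfl | h'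
      · exact hc
      · exact H.2.2.2 e (by omega) he2
    · rw [if_neg hc]
      refine ⟨le_refl _, ha, by omega, by omega⟩

-- head of the dropWhile part does not satisfy the predicate
lemma head_dropWhile_false (p : Int → Bool) (l : List Int) (d : Int) (rest : List Int)
    (h : l.dropWhile p = d :: rest) : p d = false := by
  induction l with
  | nil => simp at h
  | cons a t ih =>
    rw [List.dropWhile_cons] at h
    by_cases hp : p a = true
    · rw [if_pos hp] at h; exact ih h
    · rw [if_neg hp] at h
      cases h
      exact Bool.not_eq_true _ ▸ (by simpa using hp)

-- the central lemma: A's indexed pick equals B's scanned divisor pair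
lemma main_eq (n : Int) (hn : 1 ≤ n) :
    PySem.List.pyGetD ((divList n).map (fun i => [i, PySem.Int.truncdiv n i]))
        ((((divList n).filter (pSmall n)).length : Int)) []
      = [divLoop (n.toNat + 1) n (sqLoop (n.toNat + 1) n 1),
         PySem.Int.floordiv n (divLoop (n.toNat + 1) n (sqLoop (n.toNat + 1) n 1))] := by
  -- basic facts about divList
  have hpair : (divList n).Pairwise (· < ·) :=
    (PySem.List.pairwise_lt_pyRange_one 1 (n + 1)).filter _
  have hdown : (divList n).Pairwise (fun a b => pSmall n b = true → pSmall n a = true) := by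
    refine hpair.imp_of_mem ?_
    intro a b ha hb hab hpb
    obtain ⟨ha1, _, had⟩ := (mem_divList n a).1 ha
    obtain ⟨hb1, _, hbd⟩ := (mem_divList n b).1 hb
    rw [pSmall_iff n b hn hb1 hbd] at hpb
    rw [pSmall_iff n a hn ha1 had]
    nlinarith
  have hfilter : (divList n).filter (pSmall n) = (divList n).takeWhile (pSmall n) :=
    filter_eq_takeWhile_of_down _ _ hdown
  -- n itself is a divisor not satisfying pSmall, so dropWhile is nonempty
  have hnD : n ∈ divList n := (mem_divList n n).2 ⟨hn, le_refl n, dvd_rfl⟩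
  have hpn : pSmall n n ≠ true := fun h =>
    absurd ((pSmall_iff n n hn hn dvd_rfl).1 h) (by nlinarith)
  have hsplit := List.takeWhile_append_dropWhile (p := pSmall n) (l := divList n)
  obtain ⟨d, rest, hdrop⟩ : ∃ d rest, (divList n).dropWhile (pSmall n) = d :: rest := by
    cases hR : (divList n).dropWhile (pSmall n) with
    | nil =>
      exfalso
      have heq := hsplit
      rw [hR, List.append_nil] at heq
      exact hpn (List.mem_takeWhile_imp (heq.symm ▸ hnD))
    | cons d rest => exact ⟨d, rest, rfl⟩
  have hD : divList n = (divList n).takeWhile (pSmall n) ++ d :: rest := by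
    rw [← hdrop, hsplit]
  -- properties of d: the least divisor with n ≤ d*d
  have hdmem : d ∈ divList n := by rw [hD]; simp
  obtain ⟨hd1, hdn, hdd⟩ := (mem_divList n d).1 hdmem
  have hpd : pSmall n d = false := head_dropWhile_false _ _ _ _ hdrop
  have hdsq : n ≤ d * d := by
    by_contra hlt
    have := (pSmall_iff n d hn hd1 hdd).2 (by omega)
    simp [this] at hpd
  have hdmin : ∀ e ∈ divList n, pSmall n e = false → d ≤ e := by
    intro e he hpe
    rw [hD] at he
    rcases List.mem_append.1 he with hT | hR
    · exact absurd (List.mem_takeWhile_imp hT) (by simp [hpe])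
    · rcases List.mem_cons.1 hR with rfl | hrest
      · exact le_refl _
      · have hpairD := (hD ▸ hpair)
        have hlt : d < e := by
          have := List.pairwise_append.1 hpairD
          exact (List.pairwise_cons.1 this.2.1).1 e hrest
        omega
  -- B's scan
  obtain ⟨hs1, hs2, hs3⟩ := sqLoop_spec n (n.toNat + 1) 1 (by push_cast; omega)
  set s := sqLoop (n.toNat + 1) n 1 with hsdef
  have hsn : s ≤ n := by
    by_contra hlt
    have := hs3 n hn (by omega)
    nlinarith
  obtain ⟨hr1, hr2, hr3, hr4⟩ := divLoop_spec n (n.toNat + 1) s hsn (by push_cast; omega)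
  set r := divLoop (n.toNat + 1) n s with hrdef
  have hrd : r ∣ n := (PySem.Int.mod_eq_zero_iff_dvd _ _).1 hr3
  have hrD : r ∈ divList n := (mem_divList n r).2 ⟨by omega, hr2, hrd⟩
  have hpr : pSmall n r = false := by
    have hge : ¬ (r * r < n) := by nlinarith
    have := (pSmall_iff n r hn (by omega) hrd).not.2 hge
    simpa using this
  -- d = r
  have hdr : d = r := by
    have h1 : d ≤ r := hdmin r hrD hpr
    have hds : s ≤ d := by
      by_contra hlt
      have := hs3 d hd1 (by omega)
      omega
    have h2 : r ≤ d := by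
      by_contra hlt
      exact hr4 d hds (by omega) ((PySem.Int.mod_eq_zero_iff_dvd _ _).2 hdd)
    omega
  -- evaluate the indexed pick
  obtain ⟨k, hk⟩ := hdd
  have htd : PySem.Int.truncdiv n d = k := truncdiv_of_dvd n d k hd1 hk
  have hfd : PySem.Int.floordiv n d = k := floordiv_of_dvd n d k hd1 hk
  have hmap : (divList n).map (fun i => [i, PySem.Int.truncdiv n i])
      = ((divList n).takeWhile (pSmall n)).map (fun i => [i, PySem.Int.truncdiv n i])
        ++ [d, k] :: rest.map (fun i => [i, PySem.Int.truncdiv n i]) := by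
    conv_lhs => rw [hD]
    simp [htd]
  rw [hfilter, PySem.List.pyGetD_natCast, hmap, List.getD_eq_getElem?_getD]
  rw [List.getElem?_append_right (by simp)]
  simp only [List.length_map, Nat.sub_self, List.getElem?_cons_zero, Option.getD_some]
  rw [← hdr, hfd]

-- ===== VERDICT (by name: the statement is the Claim_ definition above) =====
theorem solution_spec : Claim_equal_solution := by
  intro brown yellow hdom hpre
  unfold Pre_solution at hpre
  unfold Spec_solution
  simp only [solution, solution_alt]
  rw [foldA]
  simp only [List.nil_append]
  exact main_eq (brown + yellow) hpre
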